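-- pv_equiv track=rewrite | github.com/aether-shell/aether-bot | nanobot/agent/taskmode/security.py | _has_unquoted_chaining
-- ===== SOURCE A (Python) =====
-- def _has_unquoted_chaining(cmd: str) -> bool:
--     """Check for ;, &&, || outside of quotes."""
--     in_single = False
--     in_double = False
--     i = 0
--     n = len(cmd)
--     while i < n:
--         c = cmd[i]
--         if c == "'" and not in_double:
--             in_single = not in_single
--         elif c == '"' and not in_single:
--             in_double = not in_double
--         elif not in_single and not in_double:
--             if c == ";":
--                 return True
--             if c == "&" and i + 1 < n and cmd[i + 1] == "&":
--                 return True
--             if c == "|" and i + 1 < n and cmd[i + 1] == "|":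
--                 return True
--         i += 1
--     return False
-- ===== SOURCE B (Python) =====
-- def _has_unquoted_chaining(cmd: str) -> bool:
--     """Check for ;, &&, || outside of quotes: jump over whole quoted segments."""
--     i, n = 0, len(cmd)
--     while i < n:
--         c = cmd[i]
--         if c == "'" or c == '"':
--             j = cmd.find(c, i + 1)
--             i = n if j == -1 else j + 1
--         elif c == ';':
--             return True
--         elif c == '&' and cmd.startswith('&&', i):
--             return True
--         elif c == '|' and cmd.startswith('||', i):
--             return True
--         else:
--             i += 1
--     return False
-- ===== Notes on version B (the rewrite author's own statement) =====
-- stated objective: alternative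
-- what changed: Replaces the per-character in_single/in_double flag toggling with a scanner that, on seeing a quote, jumps over the entire quoted segment at once via str.find, so no quoting state is carried between iterations.
import Mathlib
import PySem

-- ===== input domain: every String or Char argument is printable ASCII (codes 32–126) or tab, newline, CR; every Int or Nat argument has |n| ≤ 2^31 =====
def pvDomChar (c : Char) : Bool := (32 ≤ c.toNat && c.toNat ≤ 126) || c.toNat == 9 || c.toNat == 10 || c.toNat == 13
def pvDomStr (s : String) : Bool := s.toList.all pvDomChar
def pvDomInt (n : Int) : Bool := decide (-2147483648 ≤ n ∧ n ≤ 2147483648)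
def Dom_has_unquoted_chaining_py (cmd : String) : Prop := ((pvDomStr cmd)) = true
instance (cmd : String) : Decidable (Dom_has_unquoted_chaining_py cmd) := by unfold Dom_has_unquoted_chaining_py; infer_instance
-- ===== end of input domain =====

-- B replaces A's per-character quote-flag toggling with a scanner that jumps over whole
-- quoted segments at once; same result, alternative structure (return value only, no side effects).

-- ===== PORT A =====
-- the while loop of A: state (in_single, in_double), one character per step, lookahead via head?
def pvGoA (in_single in_double : Bool) : List Char → Bool
  | [] => false
  | c :: rest =>
    if c = '\'' ∧ in_double = false then pvGoA (!in_single) in_double rest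
    else if c = '"' ∧ in_single = false then pvGoA in_single (!in_double) rest
    else if in_single = false ∧ in_double = false then
      if c = ';' then true
      else if c = '&' ∧ rest.head? = some '&' then true
      else if c = '|' ∧ rest.head? = some '|' then true
      else pvGoA in_single in_double rest
    else pvGoA in_single in_double rest

def has_unquoted_chaining_py (cmd : String) : Bool := pvGoA false false cmd.toList

-- ===== PORT B =====
-- cmd.find(c, i+1) then jump to j+1 (or to n): drop everything up to and including the closing quote
def pvSkipQuote (q : Char) (l : List Char) : List Char := (l.dropWhile (· ≠ q)).drop 1

-- used by pvGoB's termination proof, so it stays above the port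
lemma pvSkipQuote_length_le (q : Char) (l : List Char) : (pvSkipQuote q l).length ≤ l.length := by
  simp only [pvSkipQuote, List.length_drop]
  have := List.length_dropWhile_le (· ≠ q) l
  omega

def pvGoB : List Char → Bool
  | [] => false
  | c :: rest =>
    if c = '\'' ∨ c = '"' then pvGoB (pvSkipQuote c rest)
    else if c = ';' then true
    else if c = '&' ∧ rest.head? = some '&' then true
    else if c = '|' ∧ rest.head? = some '|' then true
    else pvGoB rest
  termination_by l => l.length
  decreasing_by
    all_goals simp only [List.length_cons]
    all_goals (have := pvSkipQuote_length_le c rest; omega)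

def has_unquoted_chaining_py_alt (cmd : String) : Bool := pvGoB cmd.toList

-- ===== PRECONDITION & SPEC =====
def Spec_has_unquoted_chaining_py (cmd : String) (out : Bool) : Prop := out = has_unquoted_chaining_py_alt cmd
instance (cmd : String) (out : Bool) : Decidable (Spec_has_unquoted_chaining_py cmd out) := by unfold Spec_has_unquoted_chaining_py; infer_instance

-- ===== CLAIM (what is proved, stated in full; the proofs are below) =====
def Claim_equal_has_unquoted_chaining_py : Prop := ∀ (cmd : String), Dom_has_unquoted_chaining_py cmd → Spec_has_unquoted_chaining_py cmd (has_unquoted_chaining_py cmd)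

-- ===== LEMMAS AND PROOFS =====

-- inside a quote, A ignores everything until the matching quote; that is exactly B's jump
lemma pvGoA_single (l : List Char) : pvGoA true false l = pvGoA false false (pvSkipQuote '\'' l) := by
  induction l with
  | nil => simp [pvSkipQuote, pvGoA]
  | cons c rest ih =>
    by_cases hc : c = '\''
    · subst hc; simp [pvGoA, pvSkipQuote]
    · simp [pvGoA, pvSkipQuote, hc, ih]

lemma pvGoA_double (l : List Char) : pvGoA false true l = pvGoA false false (pvSkipQuote '"' l) := by
  induction l with
  | nil => simp [pvSkipQuote, pvGoA]
  | cons c rest ih =>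
    by_cases hc : c = '"'
    · subst hc; simp [pvGoA, pvSkipQuote]
    · simp [pvGoA, pvSkipQuote, hc, ih]

lemma pvGoA_eq_pvGoB_aux (n : Nat) : ∀ (l : List Char), l.length ≤ n → pvGoA false false l = pvGoB l := by
  induction n with
  | zero =>
    intro l h
    have : l = [] := List.eq_nil_of_length_eq_zero (Nat.le_zero.mp h)
    subst this; simp [pvGoA, pvGoB]
  | succ n ih =>
    intro l h
    match l with
    | [] => simp [pvGoA, pvGoB]
    | c :: rest =>
      have hr : rest.length ≤ n := by simpa using h
      by_cases h1 : c = '\''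
      · subst h1
        have ihq := ih (pvSkipQuote '\'' rest) (le_trans (pvSkipQuote_length_le _ _) hr)
        simp [pvGoA, pvGoB, pvGoA_single, ihq]
      · by_cases h2 : c = '"'
        · subst h2
          have ihq := ih (pvSkipQuote '"' rest) (le_trans (pvSkipQuote_length_le _ _) hr)
          simp [pvGoA, pvGoB, pvGoA_double, ihq, h1]
        · have ihr := ih rest hr
          simp [pvGoA, pvGoB, h1, h2, ihr]

lemma pvGoA_eq_pvGoB (l : List Char) : pvGoA false false l = pvGoB l :=
  pvGoA_eq_pvGoB_aux l.length l le_rfl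

-- ===== VERDICT (by name: the statement is the Claim_ definition above) =====
theorem has_unquoted_chaining_py_spec : Claim_equal_has_unquoted_chaining_py := by
  intro cmd _
  unfold Spec_has_unquoted_chaining_py has_unquoted_chaining_py has_unquoted_chaining_py_alt
  exact pvGoA_eq_pvGoB cmd.toList
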